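-- pv_equiv track=rewrite | github.com/LinJ0866/assignment-Introduction-to-AI | eight-puzzle/main_16.py | inver
-- ===== SOURCE A (Python) =====
-- def inver(stat):
--     stat1 = []
--     for i in stat:
--         stat1 += i
--     count = 0
--     for i in range(len(stat1)):
--         if stat1[i] != 0:
--             for j in range(i):
--                 if stat1[j]>stat1[i]:
--                     count += 1
--     return count
-- ===== SOURCE B (Python) =====
-- def _merge_count(left, right):
--     # merge two sorted lists; count pairs (x from left, y from right) with
--     # x > y and y != 0  (the blank never ends a counted pair)
--     merged = []
--     inv = 0
--     i = j = 0
--     while i < len(left) and j < len(right):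
--         if left[i] <= right[j]:
--             merged.append(left[i])
--             i += 1
--         else:
--             if right[j] != 0:
--                 inv += len(left) - i
--             merged.append(right[j])
--             j += 1
--     merged.extend(left[i:])
--     merged.extend(right[j:])
--     return merged, inv
--
--
-- def _sort_count(xs):
--     if len(xs) <= 1:
--         return xs, 0
--     mid = len(xs) // 2
--     ls, lc = _sort_count(xs[:mid])
--     rs, rc = _sort_count(xs[mid:])
--     ms, mc = _merge_count(ls, rs)
--     return ms, lc + rc + mc
--
--
-- def inver(stat):
--     flat = []
--     for row in stat:
--         flat.extend(row)
--     return _sort_count(flat)[1]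
-- ===== Notes on version B (the rewrite author's own statement) =====
-- stated objective: faster
-- what changed: Replaces A's quadratic nested index scan over the flattened grid with a divide-and-conquer merge sort that counts inversions during the merge, skipping pairs whose later element is the blank (0).
import Mathlib
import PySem

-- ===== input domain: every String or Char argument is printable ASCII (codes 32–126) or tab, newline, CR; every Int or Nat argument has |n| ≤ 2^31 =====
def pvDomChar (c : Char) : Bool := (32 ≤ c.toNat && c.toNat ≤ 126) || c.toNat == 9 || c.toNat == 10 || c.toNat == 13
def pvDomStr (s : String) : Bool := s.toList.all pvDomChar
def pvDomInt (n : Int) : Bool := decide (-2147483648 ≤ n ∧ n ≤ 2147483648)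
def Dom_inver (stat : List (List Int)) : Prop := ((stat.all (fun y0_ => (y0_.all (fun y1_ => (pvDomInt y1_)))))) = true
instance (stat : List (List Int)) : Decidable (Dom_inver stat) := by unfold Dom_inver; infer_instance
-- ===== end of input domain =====

-- B replaces A's quadratic nested index scan with a merge-sort inversion count
-- over the flattened grid (objective: faster, O(n log n) vs O(n^2)).


-- ===== PORT A =====
-- literal transliteration of A: flatten by 'stat1 += i', then the nested index loops
def inver (stat : List (List Int)) : Int :=
  let stat1 := stat.foldl (fun acc i => acc ++ i) []
  (PySem.List.pyRange 0 (stat1.length : Int) 1).foldl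
    (fun count i =>
      if PySem.List.pyGetD stat1 i 0 ≠ 0 then
        (PySem.List.pyRange 0 i 1).foldl
          (fun c j =>
            if PySem.List.pyGetD stat1 j 0 > PySem.List.pyGetD stat1 i 0 then c + 1 else c)
          count
      else count)
    0

-- ===== PORT B =====
-- merge of two sorted runs, counting (left element, nonzero right element) crossings
def mergeCnt : List Int → List Int → List Int × Int
  | [], r => (r, 0)
  | a :: l, [] => (a :: l, 0)
  | a :: l, b :: r =>
    if a ≤ b then
      let p := mergeCnt l (b :: r)
      (a :: p.1, p.2)
    else
      let p := mergeCnt (a :: l) r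
      (b :: p.1, p.2 + (if b ≠ 0 then ((a :: l).length : Int) else 0))

-- merge sort returning (sorted list, inversion count)
def sortCnt (xs : List Int) : List Int × Int :=
  if _h : xs.length ≤ 1 then (xs, 0)
  else
    let mid := xs.length / 2
    let p1 := sortCnt (xs.take mid)
    let p2 := sortCnt (xs.drop mid)
    let pm := mergeCnt p1.1 p2.1
    (pm.1, p1.2 + p2.2 + pm.2)
  termination_by xs.length
  decreasing_by
    · simp only [List.length_take]; omega
    · simp only [List.length_drop]; omega

def inver_alt (stat : List (List Int)) : Int :=
  let flat := stat.foldl (fun acc row => acc ++ row) []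
  (sortCnt flat).2

-- ===== PRECONDITION & SPEC =====
def Spec_inver (stat : List (List Int)) (out : Int) : Prop := out = inver_alt stat
instance (stat : List (List Int)) (out : Int) : Decidable (Spec_inver stat out) := by unfold Spec_inver; infer_instance

-- ===== CLAIM (what is proved, stated in full; the proofs are below) =====
def Claim_equal_inver : Prop := ∀ (stat : List (List Int)), Dom_inver stat → Spec_inver stat (inver stat)

-- ===== LEMMAS AND PROOFS =====

-- number of counted pairs: later element y ≠ 0, earlier element x > y
def pc : List Int → Int
  | [] => 0
  | x :: xs => (xs.countP (fun y => decide (y ≠ 0 ∧ y < x)) : Int) + pc xs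

def cross (l r : List Int) : Int :=
  (l.map (fun a => ((r.countP (fun y => decide (y ≠ 0 ∧ y < a))) : Int))).sum

theorem cross_nil_right (l : List Int) : cross l [] = 0 := by
  simp [cross]

theorem cross_cons_right (l : List Int) (b : Int) (r : List Int) :
    cross l (b :: r) =
      ((l.countP (fun a => decide (b ≠ 0 ∧ b < a))) : Int) + cross l r := by
  induction l with
  | nil => simp [cross]
  | cons a l ih =>
    simp only [cross, List.map_cons, List.sum_cons, List.countP_cons] at *
    rw [ih]
    by_cases hb : b ≠ 0 ∧ b < a <;> simp [hb] <;> ring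

theorem cross_perm_left {l l' : List Int} (h : l.Perm l') (r : List Int) :
    cross l r = cross l' r := by
  exact List.Perm.sum_eq (List.Perm.map _ h)

theorem cross_perm_right (l : List Int) {r r' : List Int} (h : r.Perm r') :
    cross l r = cross l r' := by
  unfold cross
  congr 1
  refine List.map_congr_left ?_
  intro a _
  rw [List.Perm.countP_eq _ h]

theorem pc_append (l r : List Int) : pc (l ++ r) = pc l + pc r + cross l r := by
  induction l with
  | nil => simp [pc, cross]
  | cons a l ih =>
    simp only [List.cons_append, pc, ih, List.countP_append, cross, List.map_cons,
      List.sum_cons] at *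
    push_cast
    ring

theorem mergeCnt_spec : ∀ (l r : List Int),
    l.Pairwise (· ≤ ·) → r.Pairwise (· ≤ ·) →
    (mergeCnt l r).1.Perm (l ++ r) ∧ (mergeCnt l r).1.Pairwise (· ≤ ·) ∧
      (mergeCnt l r).2 = cross l r
  | [], r, _, hr => by simp [mergeCnt, cross, hr]
  | a :: l, [], hl, _ => by simp [mergeCnt, cross, hl]
  | a :: l, b :: r, hl, hr => by
    rcases List.pairwise_cons.1 hl with ⟨ha, hl'⟩
    rcases List.pairwise_cons.1 hr with ⟨hb, hr'⟩
    by_cases hab : a ≤ b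
    · obtain ⟨hperm, hsorted, hcnt⟩ := mergeCnt_spec l (b :: r) hl' hr
      refine ⟨?_, ?_, ?_⟩
      · simp only [mergeCnt, if_pos hab]
        exact (hperm.cons a).trans (by rfl)
      · simp only [mergeCnt, if_pos hab]
        refine List.pairwise_cons.2 ⟨?_, hsorted⟩
        intro y hy
        have hy' := hperm.mem_iff.1 hy
        rcases List.mem_append.1 hy' with h1 | h2
        · exact ha _ h1
        · rcases List.mem_cons.1 h2 with rfl | h3
          · exact hab
          · exact le_trans hab (hb _ h3)
      · -- cross (a :: l) (b :: r) = cross l (b :: r): a ≤ every element of b :: r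
        have hz : (b :: r).countP (fun y => decide (y ≠ 0 ∧ y < a)) = 0 := by
          rw [List.countP_eq_zero]
          intro y hy
          have hay : a ≤ y := by
            rcases List.mem_cons.1 hy with rfl | h3
            · exact hab
            · exact le_trans hab (hb _ h3)
          simp only [decide_eq_true_eq]
          rintro ⟨_, hlt⟩; omega
        simp only [mergeCnt, if_pos hab, hcnt]
        show cross l (b :: r) = cross (a :: l) (b :: r)
        simp only [cross, List.map_cons, List.sum_cons, hz, Nat.cast_zero, zero_add]
    · obtain ⟨hperm, hsorted, hcnt⟩ := mergeCnt_spec (a :: l) r hl hr'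
      have hba : b < a := by omega
      refine ⟨?_, ?_, ?_⟩
      · simp only [mergeCnt, if_neg hab]
        exact (hperm.cons b).trans List.perm_middle.symm
      · simp only [mergeCnt, if_neg hab]
        refine List.pairwise_cons.2 ⟨?_, hsorted⟩
        intro y hy
        have hy' := hperm.mem_iff.1 hy
        rcases List.mem_append.1 hy' with h1 | h2
        · rcases List.mem_cons.1 h1 with rfl | h3
          · omega
          · have := ha _ h3; omega
        · exact hb _ h2
      · simp only [mergeCnt, if_neg hab, hcnt]
        rw [cross_cons_right]
        have hcount : ((a :: l).countP (fun x => decide (b ≠ 0 ∧ b < x)) : Int)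
            = if b ≠ 0 then ((a :: l).length : Int) else 0 := by
          by_cases hb0 : b ≠ 0
          · have hall : (a :: l).countP (fun x => decide (b ≠ 0 ∧ b < x)) = (a :: l).length := by
              rw [List.countP_eq_length]
              intro x hx
              have hax : a ≤ x := by
                rcases List.mem_cons.1 hx with rfl | h3
                · exact le_refl _
                · exact ha _ h3
              simp only [decide_eq_true_eq]
              exact ⟨hb0, by omega⟩
            rw [hall, if_pos hb0]
          · simp at hb0
            subst hb0
            simp
        rw [hcount]
        ring

theorem sortCnt_spec : ∀ (xs : List Int),
    (sortCnt xs).1.Perm xs ∧ (sortCnt xs).1.Pairwise (· ≤ ·) ∧ (sortCnt xs).2 = pc xs := by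
  intro xs
  induction hn : xs.length using Nat.strong_induction_on generalizing xs with
  | _ n ih =>
    subst hn
    by_cases h : xs.length ≤ 1
    · rw [sortCnt, dif_pos h]
      match xs, h with
      | [], _ => simp [pc]
      | [x], _ => simp [pc]
    · rw [sortCnt, dif_neg h]
      have hlt1 : (xs.take (xs.length / 2)).length < xs.length := by
        simp only [List.length_take]; omega
      have hlt2 : (xs.drop (xs.length / 2)).length < xs.length := by
        simp only [List.length_drop]; omega
      obtain ⟨p1p, p1s, p1c⟩ := ih _ hlt1 _ rfl
      obtain ⟨p2p, p2s, p2c⟩ := ih _ hlt2 _ rfl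
      obtain ⟨mp, ms, mc⟩ := mergeCnt_spec _ _ p1s p2s
      have hsplit : xs.take (xs.length / 2) ++ xs.drop (xs.length / 2) = xs :=
        List.take_append_drop _ _
      refine ⟨?_, ms, ?_⟩
      · refine mp.trans ?_
        have := p1p.append p2p
        rw [hsplit] at this
        exact this
      · show (sortCnt (xs.take (xs.length / 2))).2 + (sortCnt (xs.drop (xs.length / 2))).2 +
            (mergeCnt (sortCnt (xs.take (xs.length / 2))).1 (sortCnt (xs.drop (xs.length / 2))).1).2 = pc xs
        rw [mc, p1c, p2c]
        have := pc_append (xs.take (xs.length / 2)) (xs.drop (xs.length / 2))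
        rw [hsplit] at this
        rw [cross_perm_left p1p, cross_perm_right _ p2p]
        omega

-- A's indexed loops compute pc via the snoc recursion
theorem pc_snoc (xs : List Int) (x : Int) :
    pc (xs ++ [x]) = pc xs + (if x ≠ 0 then ((xs.countP (fun y => decide (x < y))) : Int) else 0) := by
  rw [pc_append]
  have hcx : cross xs [x] = if x ≠ 0 then ((xs.countP (fun y => decide (x < y))) : Int) else 0 := by
    rw [cross_cons_right, cross_nil_right]
    by_cases hx : x ≠ 0
    · rw [if_pos hx, add_zero]
      congr 1
      refine List.countP_congr ?_
      intro y _
      simp [hx]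
    · simp at hx; subst hx; simp
  rw [hcx]
  simp [pc]

-- inner loop of A at outer index = len ys, list = ys ++ [x]
theorem innerA (ys : List Int) (x c : Int) :
    (PySem.List.pyRange 0 (ys.length : Int) 1).foldl
        (fun c j => if PySem.List.pyGetD (ys ++ [x]) j 0 > x then c + 1 else c) c
      = c + ((ys.countP (fun y => decide (x < y))) : Int) := by
  have hcong : ∀ (acc j : Int), j ∈ PySem.List.pyRange 0 (ys.length : Int) 1 →
      (if PySem.List.pyGetD (ys ++ [x]) j 0 > x then acc + 1 else acc)
        = (if x < PySem.List.pyGetD ys j 0 then acc + 1 else acc) := by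
    intro acc j hj
    have hj' := PySem.List.mem_pyRange_one.1 hj
    have : PySem.List.pyGetD (ys ++ [x]) j 0 = PySem.List.pyGetD ys j 0 := by
      have h0 : 0 ≤ j := hj'.1
      obtain ⟨k, rfl⟩ : ∃ k : Nat, j = (k : Int) := ⟨j.toNat, by omega⟩
      have hk : k < ys.length := by exact_mod_cast hj'.2
      rw [PySem.List.pyGetD_natCast, PySem.List.pyGetD_natCast]
      simp [List.getD, hk, List.getElem?_append_left hk]
    rw [this]
  rw [PySem.List.foldl_congr_mem _ _ _ _ hcong]
  refine Eq.trans
    (PySem.List.foldl_pyRange_pyGetD' ys 0 (fun acc v => if x < v then acc + 1 else acc) c (le_refl 0)) ?_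
  rw [show List.drop (0 : Int).toNat ys = ys from rfl]
  rw [PySem.List.foldl_ite_add_one (fun y => x < y)]

theorem outerA :
    ∀ ys : List Int,
    (PySem.List.pyRange 0 (ys.length : Int) 1).foldl
      (fun count i =>
        if PySem.List.pyGetD ys i 0 ≠ 0 then
          (PySem.List.pyRange 0 i 1).foldl
            (fun c j =>
              if PySem.List.pyGetD ys j 0 > PySem.List.pyGetD ys i 0 then c + 1 else c)
            count
        else count)
      0 = pc ys := by
  intro ys
  induction ys using List.reverseRecOn with
  | nil => simp [pc, PySem.List.pyRange]
  | append_singleton ys x ih =>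
    have hlen : ((ys ++ [x]).length : Int) = (ys.length : Int) + 1 := by simp
    rw [hlen, PySem.List.pyRange_one_succ_right (by positivity)]
    rw [List.foldl_append]
    -- the prefix part of the fold only looks at indices < ys.length
    have hpref :
        (PySem.List.pyRange 0 (ys.length : Int) 1).foldl
          (fun count i =>
            if PySem.List.pyGetD (ys ++ [x]) i 0 ≠ 0 then
              (PySem.List.pyRange 0 i 1).foldl
                (fun c j =>
                  if PySem.List.pyGetD (ys ++ [x]) j 0 > PySem.List.pyGetD (ys ++ [x]) i 0 then c + 1 else c)
                count
            else count) (0 : Int)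
        = (PySem.List.pyRange 0 (ys.length : Int) 1).foldl
          (fun count i =>
            if PySem.List.pyGetD ys i 0 ≠ 0 then
              (PySem.List.pyRange 0 i 1).foldl
                (fun c j =>
                  if PySem.List.pyGetD ys j 0 > PySem.List.pyGetD ys i 0 then c + 1 else c)
                count
            else count) (0 : Int) := by
      refine PySem.List.foldl_congr_mem _ _ _ _ ?_
      intro acc i hi
      have hi' := PySem.List.mem_pyRange_one.1 hi
      have hget : ∀ m : Int, 0 ≤ m → m < (ys.length : Int) →
          PySem.List.pyGetD (ys ++ [x]) m 0 = PySem.List.pyGetD ys m 0 := by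
        intro m hm0 hmlt
        obtain ⟨k, rfl⟩ : ∃ k : Nat, m = (k : Int) := ⟨m.toNat, by omega⟩
        have hk : k < ys.length := by exact_mod_cast hmlt
        rw [PySem.List.pyGetD_natCast, PySem.List.pyGetD_natCast]
        simp [List.getD, hk, List.getElem?_append_left hk]
      rw [hget i hi'.1 hi'.2]
      by_cases hz : PySem.List.pyGetD ys i 0 ≠ 0
      · simp only [if_pos hz]
        refine PySem.List.foldl_congr_mem _ _ _ _ ?_
        intro acc2 j hj
        have hj' := PySem.List.mem_pyRange_one.1 hj
        rw [hget j hj'.1 (by omega)]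
      · simp [hz]
    rw [hpref, ih]
    -- the last step: index ys.length reads x
    have hx : PySem.List.pyGetD (ys ++ [x]) (ys.length : Int) 0 = x := by
      rw [PySem.List.pyGetD_natCast]
      simp [List.getD]
    simp only [List.foldl_cons, List.foldl_nil, hx]
    by_cases hz : x ≠ 0
    · simp only [if_pos hz]
      rw [innerA ys x (pc ys)]
      rw [pc_snoc]
      simp only [if_pos hz]
    · simp only [pc_snoc, if_neg hz, add_zero]

-- ===== VERDICT (by name: the statement is the Claim_ definition above) =====
theorem inver_spec : Claim_equal_inver := by
  intro stat _
  unfold Spec_inver inver inver_alt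
  rw [PySem.List.foldl_append_eq_flatten]
  simp only [List.nil_append]
  exact (outerA stat.flatten).trans ((sortCnt_spec stat.flatten).2.2).symm
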